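-- pv_equiv track=rewrite | github.com/RafaelBarrantes25/RafaelBarrantes25 | intro_taller/tarea_taller_vectores.py | vector_nulo
-- ===== SOURCE A (Python) =====
-- def vector_nulo(vector):
--     """
--     Comprueba si un vector es nulo
--     E: lista
--     S: True o False
--     R: Vector lista
--     """
--     if type(vector) != list:
--         return "Error 0"
--     elif vector == []:
--         return True
--     elif vector[0] == 0:
--         return vector_nulo(vector[1:])
--     else:
--         return False
-- ===== SOURCE B (Python) =====
-- def vector_nulo(vector):
--     if type(vector) != list:
--         return "Error 0"
--     for x in vector:
--         if x != 0:
--             return False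
--     return True
-- ===== Notes on version B (the rewrite author's own statement) =====
-- stated objective: simpler
-- what changed: Replaced the tail-slicing recursion (which copies the rest of the list at every step) with a single explicit for-loop returning False at the first nonzero element.
import Mathlib
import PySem

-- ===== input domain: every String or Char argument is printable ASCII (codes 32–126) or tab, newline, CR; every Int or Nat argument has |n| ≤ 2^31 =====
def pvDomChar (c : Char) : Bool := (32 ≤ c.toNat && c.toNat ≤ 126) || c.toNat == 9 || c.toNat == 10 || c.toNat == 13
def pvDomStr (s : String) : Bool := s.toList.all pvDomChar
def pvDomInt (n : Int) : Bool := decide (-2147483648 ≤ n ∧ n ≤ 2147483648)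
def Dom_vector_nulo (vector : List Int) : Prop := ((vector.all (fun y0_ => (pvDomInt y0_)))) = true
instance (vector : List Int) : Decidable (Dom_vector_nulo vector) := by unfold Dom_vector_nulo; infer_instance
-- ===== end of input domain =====

-- ===== PORT A =====
-- A: recursion on vector[1:] (ported with PySem slice)
def vector_nulo (vector : List Int) : Bool :=
  if vector = [] then true
  else if (PySem.List.pyGet? vector 0).getD 0 = 0 then
    vector_nulo (PySem.List.slice vector (some 1) none)
  else false
decreasing_by
  simp only [PySem.List.slice_from_one]
  cases vector <;> simp_all

-- ===== PORT B =====
-- B: explicit loop, early return on first nonzero element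
def vnLoop : List Int → Bool
  | [] => true
  | x :: xs => if x ≠ 0 then false else vnLoop xs

def vector_nulo_alt (vector : List Int) : Bool := vnLoop vector

-- ===== PRECONDITION & SPEC =====
def Spec_vector_nulo (vector : List Int) (out : Bool) : Prop := out = vector_nulo_alt vector
instance (vector : List Int) (out : Bool) : Decidable (Spec_vector_nulo vector out) := by unfold Spec_vector_nulo; infer_instance

-- ===== CLAIM (what is proved, stated in full; the proofs are below) =====
def Claim_equal_vector_nulo : Prop := ∀ (vector : List Int), Dom_vector_nulo vector → Spec_vector_nulo vector (vector_nulo vector)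

-- ===== LEMMAS AND PROOFS =====

-- ===== VERDICT (by name: the statement is the Claim_ definition above) =====
theorem vn_eq (vector : List Int) : vector_nulo vector = vnLoop vector := by
  induction vector with
  | nil => simp [vector_nulo, vnLoop]
  | cons a l ih =>
    rw [vector_nulo]
    by_cases h : a = 0 <;>
      simp [vnLoop, PySem.List.slice_from_one, PySem.List.pyGet?, PySem.List.pyIdx?, ih, h]

theorem vector_nulo_spec : Claim_equal_vector_nulo := by
  intro v _
  unfold Spec_vector_nulo vector_nulo_alt
  exact vn_eq v
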